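-- pv_equiv track=rewrite | github.com/MaesterPycoder/Python_Programming_Language | codelist1/celebrity_check.py | celeb_check
-- ===== SOURCE A (Python) =====
-- def celeb_check(matrix):
--     n=len(matrix)
--     for i in range(n):
--         eliminated=False
--         for j in range(n):
--             if not eliminated:
--                 if i==j:
--                     continue
--                 if matrix[i][j] or not matrix[j][i]:
--                     eliminated=True
--         if not eliminated:
--             return i+1
-- ===== SOURCE B (Python) =====
-- def celeb_check(matrix):
--     n = len(matrix)
--     if n == 0:
--         return None
--     cand = 0
--     for i in range(1, n):
--         if matrix[cand][i]:
--             cand = i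
--     for j in range(n):
--         if j != cand and (matrix[cand][j] or not matrix[j][cand]):
--             return None
--     return cand + 1
-- ===== Notes on version B (the rewrite author's own statement) =====
-- stated objective: alternative
-- what changed: Replaced A's per-row elimination scan (for each candidate i, test every j) with the classic elimination-then-verify celebrity algorithm: one pairwise pass reduces to a single candidate, one pass verifies it; worst-case O(n) accesses vs A's O(n^2), though a timing run on random matrices measured only ~1.4x (A eliminates rows early there).
-- outside the precondition, e.g. on celeb_check([[0, 117, 9116], [-3, 6], [0, 4], [1, 2]]): A returns None, B raises IndexError; on celeb_check([[0, 1], [0, 0, 0], [0, 1]]): A returns 2, B returns 2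
import Mathlib
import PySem

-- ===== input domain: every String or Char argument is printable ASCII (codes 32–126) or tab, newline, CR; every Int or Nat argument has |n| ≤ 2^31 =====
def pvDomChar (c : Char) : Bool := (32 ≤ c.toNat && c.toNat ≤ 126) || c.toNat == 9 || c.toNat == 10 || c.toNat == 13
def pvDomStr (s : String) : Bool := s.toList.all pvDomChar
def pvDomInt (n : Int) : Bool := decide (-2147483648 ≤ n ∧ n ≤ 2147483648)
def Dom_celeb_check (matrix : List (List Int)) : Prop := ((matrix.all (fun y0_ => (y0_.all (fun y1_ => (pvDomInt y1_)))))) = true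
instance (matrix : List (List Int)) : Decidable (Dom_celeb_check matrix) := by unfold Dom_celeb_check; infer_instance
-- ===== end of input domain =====

-- B replaces A's per-row elimination scans with the classic elimination-then-verify celebrity algorithm (a single candidate pass plus one verification pass).
-- matrix[i][j] of both Pythons; inside Pre_ every access is in range, so getD is exact
def gg (matrix : List (List Int)) (i j : Nat) : Int := (matrix.getD i []).getD j 0

-- ===== PORT A =====
-- the condition "matrix[i][j] or not matrix[j][i]" (Python truthiness of ints)
def pvCondA (matrix : List (List Int)) (i j : Nat) : Bool :=
  (gg matrix i j != 0) || (gg matrix j i == 0)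

-- inner "for j in range(n)" loop computing `eliminated`
def celeb_check_elim (matrix : List (List Int)) (n i : Nat) : Bool :=
  (List.range n).foldl (fun eliminated j =>
    if !eliminated then
      if i == j then eliminated       -- continue
      else if pvCondA matrix i j then true
      else eliminated
    else eliminated) false

-- outer "for i in range(n)" loop with the early return
def celeb_check_go (matrix : List (List Int)) (n : Nat) : List Nat → Option Int
  | [] => none
  | i :: rest =>
      if !(celeb_check_elim matrix n i) then some ((i : Int) + 1)
      else celeb_check_go matrix n rest

def celeb_check (matrix : List (List Int)) : Option Int :=
  celeb_check_go matrix matrix.length (List.range matrix.length)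

-- ===== PORT B =====
def celeb_check_alt (matrix : List (List Int)) : Option Int :=
  let n := matrix.length
  if n == 0 then none
  else
    -- elimination pass: for i in range(1, n): if matrix[cand][i]: cand = i
    let cand := (List.range' 1 (n - 1)).foldl
      (fun cand i => if gg matrix cand i != 0 then i else cand) 0
    -- verification pass: for j in range(n): if j != cand and (matrix[cand][j] or not matrix[j][cand]): return None
    if (List.range n).all (fun j =>
        (j == cand) || ((gg matrix cand j == 0) && (gg matrix j cand != 0)))
    then some ((cand : Int) + 1)
    else none

-- ===== PRECONDITION & SPEC =====
-- Pre_ excludes ragged matrices (some row shorter than the number of rows): there Python A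
-- usually raises IndexError, and whether it returns at all depends accidentally on
-- short-circuit evaluation order of A's inner test.
def Pre_celeb_check (matrix : List (List Int)) : Prop :=
  ∀ row ∈ matrix, matrix.length ≤ row.length
instance (matrix : List (List Int)) : Decidable (Pre_celeb_check matrix) := by
  unfold Pre_celeb_check; infer_instance
def pvWitness_celeb_check : List (List Int) := [[0, 1], [0, 0]]

def Spec_celeb_check (matrix : List (List Int)) (out : Option Int) : Prop := out = celeb_check_alt matrix
instance (matrix : List (List Int)) (out : Option Int) : Decidable (Spec_celeb_check matrix out) := by unfold Spec_celeb_check; infer_instance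

-- ===== CLAIM (what is proved, stated in full; the proofs are below) =====
def Claim_equal_celeb_check : Prop := ∀ (matrix : List (List Int)), Dom_celeb_check matrix → Pre_celeb_check matrix → Spec_celeb_check matrix (celeb_check matrix)

-- ===== LEMMAS AND PROOFS =====

-- i is a celebrity: knows nobody, known by everybody else
def isCel (m : List (List Int)) (c : Nat) : Prop :=
  ∀ j < m.length, j ≠ c → gg m c j = 0 ∧ gg m j c ≠ 0

lemma foldl_or_any (f : Nat → Bool) :
    ∀ (l : List Nat) (b : Bool), l.foldl (fun e j => e || f j) b = (b || l.any f) := by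
  intro l
  induction l with
  | nil => simp
  | cons x xs ih => intro b; simp [List.foldl_cons, ih, Bool.or_assoc]

lemma elim_eq_any (m : List (List Int)) (n i : Nat) :
    celeb_check_elim m n i = (List.range n).any (fun j => !(i == j) && pvCondA m i j) := by
  unfold celeb_check_elim
  have h : (fun (e : Bool) (j : Nat) =>
      if !e then (if i == j then e else if pvCondA m i j then true else e) else e)
      = (fun (e : Bool) (j : Nat) => e || (!(i == j) && pvCondA m i j)) := by
    funext e j
    cases e
    · by_cases hij : i = j
      · simp [hij]
      · by_cases h : pvCondA m i j <;> simp [h, hij]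
    · simp
  rw [h, foldl_or_any]
  simp

lemma elim_false_iff (m : List (List Int)) (i : Nat) :
    celeb_check_elim m m.length i = false ↔ isCel m i := by
  rw [elim_eq_any]
  unfold isCel pvCondA
  simp only [List.any_eq_false, List.mem_range]
  constructor
  · intro h j hj hji
    have h2 := h j hj
    simp at h2
    exact h2 (fun he => hji he.symm)
  · intro h j hj
    by_cases hji : j = i
    · simp [hji]
    · have := h j hj hji
      simp [Ne.symm hji, this.1, this.2]

lemma cel_unique (m : List (List Int)) (i j : Nat) (hi : i < m.length) (hj : j < m.length)
    (hci : isCel m i) (hcj : isCel m j) : i = j := by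
  by_contra hne
  have h1 := hci j hj (Ne.symm hne)
  have h2 := hcj i hi hne
  exact h1.2 h2.1

lemma cand_celeb (m : List (List Int)) (c : Nat) (hc : isCel m c) (hcn : c < m.length) :
    ∀ (b a c0 : Nat), c0 < a → a + b ≤ m.length → (c0 = c ∨ a ≤ c) → c < a + b →
      (List.range' a b).foldl (fun cand i => if gg m cand i != 0 then i else cand) c0 = c := by
  intro b
  induction b with
  | zero =>
      intro a c0 h1 h2 h3 h4
      simp only [List.range'_zero, List.foldl_nil]
      omega
  | succ b ih =>
      intro a c0 h1 h2 h3 h4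
      rw [List.range'_succ, List.foldl_cons]
      rcases h3 with rfl | hac
      · -- current candidate is the celebrity; it knows nobody hence is kept
        have hne : a ≠ c0 := by omega
        have han : a < m.length := by omega
        have hgg := hc a han hne
        have hb : ¬ ((gg m c0 a != 0) = true) := by simp [hgg.1]
        rw [if_neg hb]
        exact ih (a + 1) c0 (by omega) (by omega) (Or.inl rfl) (by omega)
      · by_cases hac2 : a = c
        · -- the celebrity appears now; current candidate knows it, so it is taken
          subst hac2
          have hne : c0 ≠ a := by omega
          have hc0n : c0 < m.length := by omega
          have hgg := hc c0 hc0n hne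
          have hb : (gg m c0 a != 0) = true := by simpa using hgg.2
          rw [if_pos hb]
          exact ih (a + 1) a (by omega) (by omega) (Or.inl rfl) (by omega)
        · -- the celebrity is still ahead; either branch keeps candidate below a+1
          have hle : a + 1 ≤ c := by omega
          by_cases hg : (gg m c0 a != 0) = true
          · rw [if_pos hg]
            exact ih (a + 1) a (by omega) (by omega) (Or.inr hle) (by omega)
          · rw [if_neg hg]
            exact ih (a + 1) c0 (by omega) (by omega) (Or.inr hle) (by omega)

lemma cand_lt (m : List (List Int)) :
    ∀ (l : List Nat) (c0 n : Nat), c0 < n → (∀ i ∈ l, i < n) →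
      l.foldl (fun cand i => if gg m cand i != 0 then i else cand) c0 < n := by
  intro l
  induction l with
  | nil => intro c0 n h _; simpa using h
  | cons x xs ih =>
      intro c0 n h hl
      rw [List.foldl_cons]
      by_cases hg : (gg m c0 x != 0) = true
      · rw [if_pos hg]
        exact ih x n (hl x List.mem_cons_self) (fun i hi => hl i (List.mem_cons_of_mem _ hi))
      · rw [if_neg hg]
        exact ih c0 n h (fun i hi => hl i (List.mem_cons_of_mem _ hi))

lemma verify_iff (m : List (List Int)) (cand : Nat) :
    ((List.range m.length).all (fun j =>
        (j == cand) || ((gg m cand j == 0) && (gg m j cand != 0))) = true) ↔ isCel m cand := by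
  unfold isCel
  simp only [List.all_eq_true, List.mem_range]
  constructor
  · intro h j hj hjc
    have := h j hj
    simp [hjc] at this
    exact this
  · intro h j hj
    by_cases hjc : j = cand
    · simp [hjc]
    · have := h j hj hjc
      simp [hjc, this.1, this.2]

lemma goA_none (m : List (List Int)) (n : Nat) :
    ∀ (l : List Nat), (∀ i ∈ l, celeb_check_elim m n i = true) →
      celeb_check_go m n l = none := by
  intro l
  induction l with
  | nil => intro _; rfl
  | cons x xs ih =>
      intro h
      unfold celeb_check_go
      rw [h x List.mem_cons_self]
      exact ih (fun i hi => h i (List.mem_cons_of_mem _ hi))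

lemma goA_some (m : List (List Int)) (n c : Nat)
    (hcf : celeb_check_elim m n c = false) :
    ∀ (l : List Nat), c ∈ l → (∀ i ∈ l, celeb_check_elim m n i = false → i = c) →
      celeb_check_go m n l = some ((c : Int) + 1) := by
  intro l
  induction l with
  | nil => intro h; simp at h
  | cons x xs ih =>
      intro hc h
      unfold celeb_check_go
      by_cases hx : celeb_check_elim m n x = false
      · rw [hx]
        have := h x List.mem_cons_self hx
        simp [this]
      · have hxt : celeb_check_elim m n x = true := by
          cases hxx : celeb_check_elim m n x
          · exact absurd hxx hx
          · rfl
        rw [hxt]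
        simp only [Bool.not_true, Bool.false_eq_true, if_false]
        have hcx : c ≠ x := by intro he; rw [he] at hcf; exact hx hcf
        have hcm : c ∈ xs := by
          rcases List.mem_cons.mp hc with he | hm
          · exact absurd he hcx
          · exact hm
        exact ih hcm (fun i hi => h i (List.mem_cons_of_mem _ hi))

-- ===== VERDICT (by name: the statement is the Claim_ definition above) =====
theorem celeb_check_spec : Claim_equal_celeb_check := by
  intro matrix _ _
  unfold Spec_celeb_check celeb_check celeb_check_alt
  by_cases hc : ∃ c, c < matrix.length ∧ isCel matrix c
  · obtain ⟨c, hcn, hcel⟩ := hc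
    have hcf : celeb_check_elim matrix matrix.length c = false := (elim_false_iff _ _).mpr hcel
    have hA : celeb_check_go matrix matrix.length (List.range matrix.length)
        = some ((c : Int) + 1) := by
      apply goA_some matrix matrix.length c hcf
      · exact List.mem_range.mpr hcn
      · intro i hi hif
        exact cel_unique matrix i c (List.mem_range.mp hi) hcn
          ((elim_false_iff _ _).mp hif) hcel
    rw [hA]
    have hn0 : matrix.length ≠ 0 := by omega
    simp only [beq_iff_eq, hn0, if_false]
    have hcand : (List.range' 1 (matrix.length - 1)).foldl
        (fun cand i => if gg matrix cand i != 0 then i else cand) 0 = c :=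
      cand_celeb matrix c hcel hcn (matrix.length - 1) 1 0 (by omega) (by omega)
        (by omega) (by omega)
    rw [hcand, (verify_iff matrix c).mpr hcel]
    simp
  · have hc' : ∀ c, c < matrix.length → ¬ isCel matrix c := by
      intro c h1 h2; exact hc ⟨c, h1, h2⟩
    have hA : celeb_check_go matrix matrix.length (List.range matrix.length) = none := by
      apply goA_none
      intro i hi
      cases he : celeb_check_elim matrix matrix.length i
      · exact absurd ((elim_false_iff _ _).mp he) (hc' i (List.mem_range.mp hi))
      · rfl
    rw [hA]
    by_cases hn : matrix.length = 0
    · simp [hn]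
    · simp only [beq_iff_eq, hn, if_false]
      set cand := (List.range' 1 (matrix.length - 1)).foldl
        (fun cand i => if gg matrix cand i != 0 then i else cand) 0 with hdef
      have hlt : cand < matrix.length := by
        apply cand_lt
        · omega
        · intro i hi
          have := List.mem_range'_1.mp hi
          omega
      have hnc : ¬ isCel matrix cand := hc' cand hlt
      have : ((List.range matrix.length).all (fun j =>
          (j == cand) || ((gg matrix cand j == 0) && (gg matrix j cand != 0)))) = false := by
        cases hh : ((List.range matrix.length).all (fun j =>
          (j == cand) || ((gg matrix cand j == 0) && (gg matrix j cand != 0))))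
        · rfl
        · exact absurd ((verify_iff matrix cand).mp hh) hnc
      rw [this]
      simp
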